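-- pv_equiv track=rewrite | github.com/danejo3/CS235TA | submission_driver (copy 9.25.19)/Grader.py | decomment
-- ===== SOURCE A (Python) =====
-- def decomment_word(word):
--     if len(word) < 2:
--         return word
--     newWord = ''
--     for i  in range(len(word)):
--         char = word[i]
--         if char == '/':
--             if (len(word) - 1) == i:
--                 return word
--             if word[i + 1] == '/':
--                 return newWord
--         newWord += char
--     return word
--
-- def decomment(list_of_words):
--     command = []
--     for word in list_of_words:
--         new_word = decomment_word(word)
--         command.append(new_word)
--         if not len(new_word) == len(word):
--             break
--     return command
-- ===== SOURCE B (Python) =====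
-- def decomment(list_of_words):
--     for i, word in enumerate(list_of_words):
--         idx = word.find('//')
--         if idx != -1:
--             return list_of_words[:i] + [word[:idx]]
--     return list(list_of_words)
-- ===== Notes on version B (the rewrite author's own statement) =====
-- stated objective: simpler
-- what changed: Replaces the char-by-char helper that rebuilds each word and the append-then-break loop by a single pass that uses str.find('//') per word and returns the untouched list prefix plus the sliced word.
import Mathlib
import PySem

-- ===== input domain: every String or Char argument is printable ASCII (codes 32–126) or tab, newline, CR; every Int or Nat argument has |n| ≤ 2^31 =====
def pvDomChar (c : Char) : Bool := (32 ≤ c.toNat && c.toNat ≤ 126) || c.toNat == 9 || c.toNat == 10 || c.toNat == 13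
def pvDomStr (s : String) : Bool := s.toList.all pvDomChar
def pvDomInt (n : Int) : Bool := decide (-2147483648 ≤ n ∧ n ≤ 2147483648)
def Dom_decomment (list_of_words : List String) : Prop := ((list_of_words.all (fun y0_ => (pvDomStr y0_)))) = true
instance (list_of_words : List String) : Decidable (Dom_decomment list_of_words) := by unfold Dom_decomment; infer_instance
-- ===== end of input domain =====

-- B replaces A's char-by-char helper plus append-and-break loop by str.find('//') and a prefix slice (objective: simpler).

-- ===== PORT A =====
-- the 'for i in range(len(word))' loop of decomment_word: walks the remaining chars, acc = newWord
def pvDwGo (word : String) : List Char → List Char → String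
  | [], _ => word                                  -- loop ended: return word
  | c :: rest, acc =>
    if c = '/' then
      match rest with
      | [] => word                                 -- (len(word) - 1) == i
      | d :: _ =>
        if d = '/' then String.ofList acc              -- word[i + 1] == '/': return newWord
        else pvDwGo word rest (acc ++ [c])         -- newWord += char
    else pvDwGo word rest (acc ++ [c])

def decomment_word (word : String) : String :=
  if PySem.Str.len word < 2 then word
  else pvDwGo word word.toList []

def decomment : List String → List String
  | [] => []
  | w :: rest =>
    let nw := decomment_word w
    if PySem.Str.len nw = PySem.Str.len w then nw :: decomment rest
    else [nw]                                      -- append then break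

-- ===== PORT B =====
-- the 'for i, word in enumerate(list_of_words)' loop of Source B
def pvAltGo (ws : List String) : List (Int × String) → List String
  | [] => ws                                       -- list(list_of_words)
  | (i, word) :: rest =>
    let idx := PySem.Str.find word "//"
    if idx ≠ -1 then
      PySem.List.slice ws none (some i) ++ [PySem.Str.slice word none (some idx)]
    else pvAltGo ws rest

def decomment_alt (list_of_words : List String) : List String :=
  pvAltGo list_of_words (PySem.List.enumerate list_of_words)

-- ===== PRECONDITION & SPEC =====
def Spec_decomment (list_of_words : List String) (out : List String) : Prop := out = decomment_alt list_of_words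
instance (list_of_words : List String) (out : List String) : Decidable (Spec_decomment list_of_words out) := by unfold Spec_decomment; infer_instance

-- ===== CLAIM (what is proved, stated in full; the proofs are below) =====
def Claim_equal_decomment : Prop := ∀ (list_of_words : List String), Dom_decomment list_of_words → Spec_decomment list_of_words (decomment list_of_words)

-- ===== LEMMAS AND PROOFS =====

-- index of the first "//" in a char list (proof-side characterisation)
def pvDs : List Char → Option Nat
  | [] => none
  | [_] => none
  | c :: d :: rest =>
    if c = '/' ∧ d = '/' then some 0 else (pvDs (d :: rest)).map (· + 1)

theorem pv_prefix_two {c d : Char} {rs : List Char} :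
    ['/', '/'] <+: c :: d :: rs ↔ c = '/' ∧ d = '/' := by
  constructor
  · intro h
    rw [List.cons_prefix_cons] at h
    obtain ⟨h1, h2⟩ := h
    rw [List.cons_prefix_cons] at h2
    exact ⟨h1.symm, h2.1.symm⟩
  · rintro ⟨rfl, rfl⟩
    exact ⟨rs, rfl⟩

theorem pvDs_some_spec : ∀ (cs : List Char) (k : Nat), pvDs cs = some k →
    (['/', '/'] <+: cs.drop k) ∧ (∀ i < k, ¬ ['/', '/'] <+: cs.drop i) ∧ k + 2 ≤ cs.length := by
  intro cs
  induction cs with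
  | nil => intro k h; simp [pvDs] at h
  | cons c rest ih =>
    intro k h
    match rest with
    | [] => simp [pvDs] at h
    | d :: rs =>
      by_cases hc : c = '/' ∧ d = '/'
      · simp [pvDs, hc] at h
        subst h
        obtain ⟨rfl, rfl⟩ := hc
        exact ⟨⟨rs, rfl⟩, by omega, by simp⟩
      · simp [pvDs, hc] at h
        obtain ⟨k', hk', rfl⟩ := h
        obtain ⟨h1, h2, h3⟩ := ih k' hk'
        refine ⟨by simpa using h1, ?_, by simp at h3 ⊢; omega⟩
        intro i hi
        match i with
        | 0 =>
          intro hp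
          rw [List.drop_zero] at hp
          exact hc (pv_prefix_two.mp hp)
        | i + 1 => simpa using h2 i (by omega)

theorem pvDs_none_spec : ∀ (cs : List Char), pvDs cs = none →
    ∀ i, ¬ ['/', '/'] <+: cs.drop i := by
  intro cs
  induction cs with
  | nil => intro _ i hp; have := hp.length_le; simp at this
  | cons c rest ih =>
    intro h i
    match rest with
    | [] =>
      intro hp
      have := hp.length_le
      match i with
      | 0 => simp at this
      | i + 1 => simp at this
    | d :: rs =>
      by_cases hc : c = '/' ∧ d = '/'
      · simp [pvDs, hc] at h
      · simp [pvDs, hc] at h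
        match i with
        | 0 =>
          intro hp
          rw [List.drop_zero] at hp
          exact hc (pv_prefix_two.mp hp)
        | i + 1 => simpa using ih h i

-- Chars.find cs "//" computes pvDs
theorem pv_find_eq_ds (cs : List Char) :
    PySem.Chars.find cs ['/', '/'] =
      (match pvDs cs with | none => (-1 : Int) | some k => (k : Int)) := by
  cases hds : pvDs cs with
  | none =>
    have hni : ¬ ['/', '/'] <:+: cs := by
      intro hinf
      have : PySem.Chars.isIn ['/', '/'] cs = true := (PySem.Chars.isIn_iff_infix _ _).mpr hinf
      obtain ⟨j, hj⟩ := (PySem.Chars.exists_prefix_drop_iff_isIn (sub := ['/', '/']) (s := cs)).mpr this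
      exact pvDs_none_spec cs hds j hj
    simpa using (PySem.Chars.find_eq_neg_one_iff _ _).mpr hni
  | some k =>
    obtain ⟨h1, h2, _⟩ := pvDs_some_spec cs k hds
    have hinf : ['/', '/'] <:+: cs := by
      have := (PySem.Chars.exists_prefix_drop_iff_isIn (sub := ['/', '/']) (s := cs)).mp ⟨k, h1⟩
      exact (PySem.Chars.isIn_iff_infix _ _).mp this
    have hnn : 0 ≤ PySem.Chars.find cs ['/', '/'] := (PySem.Chars.find_nonneg_iff _ _).mpr hinf
    obtain ⟨hf1, hf2⟩ := PySem.Chars.find_spec (s := cs) (sub := ['/', '/']) hnn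
    have hle1 : ¬ (PySem.Chars.find cs ['/', '/']).toNat < k := fun hlt => h2 _ hlt hf1
    have hle2 : ¬ k < (PySem.Chars.find cs ['/', '/']).toNat := fun hlt => hf2 _ hlt h1
    simp only
    omega

-- the helper loop computes 'truncate at pvDs'
theorem pvDwGo_eq (word : String) : ∀ (cs acc : List Char),
    pvDwGo word cs acc =
      (match pvDs cs with | none => word | some k => String.ofList (acc ++ cs.take k)) := by
  intro cs
  induction cs with
  | nil => intro acc; simp [pvDwGo, pvDs]
  | cons c rest ih =>
    intro acc
    match rest with
    | [] =>
      by_cases hc : c = '/' <;> simp [pvDwGo, pvDs, hc]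
    | d :: rs =>
      by_cases hc : c = '/' ∧ d = '/'
      · obtain ⟨rfl, rfl⟩ := hc
        simp [pvDwGo, pvDs]
      · have hstep : pvDwGo word (c :: d :: rs) acc = pvDwGo word (d :: rs) (acc ++ [c]) := by
          by_cases h1 : c = '/'
          · have h2 : ¬ d = '/' := fun h2 => hc ⟨h1, h2⟩
            simp [pvDwGo, h1, h2]
          · simp [pvDwGo, h1]
        rw [hstep, ih]
        simp only [pvDs, if_neg hc]
        cases pvDs (d :: rs) <;> simp

theorem pv_decomment_word_none {w : String} (h : pvDs w.toList = none) :
    decomment_word w = w := by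
  unfold decomment_word
  split
  · rfl
  · rw [pvDwGo_eq, h]

theorem pv_decomment_word_some {w : String} {k : Nat} (h : pvDs w.toList = some k) :
    decomment_word w = String.ofList (w.toList.take k) ∧
      PySem.Str.len (String.ofList (w.toList.take k)) ≠ PySem.Str.len w := by
  obtain ⟨_, _, hlen⟩ := pvDs_some_spec _ _ h
  have hk : k < w.toList.length := by omega
  have hl : w.toList.length = w.length := String.length_toList
  constructor
  · unfold decomment_word
    split
    · rename_i hlt
      simp [PySem.Str.len_eq] at hlt
      omega
    · rw [pvDwGo_eq, h]; simp
  · simp [PySem.Str.len_eq, List.length_take]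
    omega

-- Str.find w "//" as pvDs
theorem pv_str_find (w : String) :
    PySem.Str.find w "//" =
      (match pvDs w.toList with | none => (-1 : Int) | some k => (k : Int)) := by
  have : ("//" : String).toList = ['/', '/'] := by decide
  rw [PySem.Str.find_eq, this, pv_find_eq_ds]

-- main loop invariant: processing the suffix with the matching enumerate offset
theorem pv_main : ∀ (suf pre : List String),
    pvAltGo (pre ++ suf) (PySem.List.enumerate suf (pre.length : Int)) = pre ++ decomment suf := by
  intro suf
  induction suf with
  | nil => intro pre; simp [PySem.List.enumerate_nil, pvAltGo, decomment]
  | cons w rest ih =>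
    intro pre
    rw [PySem.List.enumerate_cons]
    cases hds : pvDs w.toList with
    | none =>
      have hfind : PySem.Str.find w "//" = -1 := by rw [pv_str_find, hds]
      have hstep : pvAltGo (pre ++ w :: rest) ((↑pre.length, w) :: PySem.List.enumerate rest (↑pre.length + 1)) =
          pvAltGo (pre ++ w :: rest) (PySem.List.enumerate rest (↑pre.length + 1)) := by
        simp only [pvAltGo]
        rw [hfind]
        simp
      rw [hstep]
      have hlist : pre ++ w :: rest = (pre ++ [w]) ++ rest := by simp
      have hcast : ((pre.length : Int) + 1) = ((pre ++ [w]).length : Int) := by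
        simp
      rw [hlist, hcast, ih (pre ++ [w])]
      have hw := pv_decomment_word_none hds
      simp [decomment, hw]
    | some k =>
      have hfind : PySem.Str.find w "//" = (k : Int) := by rw [pv_str_find, hds]
      obtain ⟨hw, hne⟩ := pv_decomment_word_some hds
      have hslice : PySem.Str.slice w none (some (k : Int)) = String.ofList (w.toList.take k) := by
        rw [← String.toList_inj, PySem.Str.toList_slice]
        simp [PySem.Chars.slice, PySem.List.slice_to_natCast]
      have hstep : pvAltGo (pre ++ w :: rest) ((↑pre.length, w) :: PySem.List.enumerate rest (↑pre.length + 1)) =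
          PySem.List.slice (pre ++ w :: rest) none (some (pre.length : Int)) ++
            [PySem.Str.slice w none (some (k : Int))] := by
        simp only [pvAltGo]
        rw [hfind]
        rw [if_pos (show ((k : Int) ≠ -1) by omega)]
      rw [hstep]
      rw [PySem.List.slice_to_natCast, List.take_left, hslice]
      have hk2 : k < w.length := by
        obtain ⟨_, _, h3⟩ := pvDs_some_spec _ _ hds
        have hl : w.toList.length = w.length := String.length_toList
        omega
      simp [decomment, hw]
      intro h
      exact absurd h (by omega)

-- ===== VERDICT (by name: the statement is the Claim_ definition above) =====
theorem decomment_spec : Claim_equal_decomment := by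
  intro ws _
  unfold Spec_decomment decomment_alt
  have := pv_main ws []
  simpa [PySem.List.enumerate] using this.symm
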